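-- pv_equiv track=rewrite | github.com/pypi-data/pypi-mirror-402 | packages/paperpipe/paperpipe-1.2.1-py3-none-any.whl/paperpipe/config.py | embedding_model_from_index_name
-- ===== SOURCE A (Python) =====
-- def embedding_model_from_index_name(index_name: str) -> str | None:
--     """
--     Reverse-engineer embedding model from paperpipe index name.
--
--     Returns None if name doesn't follow paperpipe naming convention.
--     Best-effort for ambiguous cases (multiple underscores).
--
--     Examples:
--         paperpipe_voyage_voyage-3.5 → voyage/voyage-3.5
--         paperpipe_openai_text-embedding-3-small → openai/text-embedding-3-small
--         paperpipe_gemini_gemini-embedding-001 → gemini/gemini-embedding-001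
--         paperpipe_default → ""
--         custom_name → None
--     """
--     if not index_name.startswith("paperpipe_"):
--         return None
--
--     suffix = index_name[len("paperpipe_") :]
--
--     if suffix == "default":
--         return ""
--
--     # Try known provider patterns (with slashes in original model IDs)
--     # These are common LiteLLM provider prefixes
--     known_providers = [
--         "openai/",
--         "voyage/",
--         "ollama/",
--         "openrouter/",
--         "anthropic/",
--         "google/",
--         "gemini/",
--         "cohere/",
--         "huggingface/",
--     ]
--
--     for provider in known_providers:
--         safe_provider = provider.replace("/", "_")
--         if suffix.startswith(safe_provider):
--             # Found a match - reconstruct by replacing first underscore with slash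
--             # e.g., "voyage_voyage-3.5" → "voyage/voyage-3.5"
--             return suffix.replace("_", "/", 1)
--
--     # Generic fallback for models without provider prefix
--     # This is ambiguous (foo_bar_baz could be foo/bar/baz or foo_bar/baz)
--     # but better than nothing for backward compatibility
--     # Most embedding models follow provider/model pattern, so replace first underscore
--     if "_" in suffix:
--         return suffix.replace("_", "/", 1)
--
--     # No underscores left, return as-is
--     return suffix
-- ===== SOURCE B (Python) =====
-- def embedding_model_from_index_name(index_name: str) -> str | None:
--     """Single character-level pass: verify the prefix position by position,
--     then emit the remaining characters one by one, turning the first '_'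
--     seen for '/'. No provider table, no startswith/slice/replace calls."""
--     prefix = "paperpipe_"
--     if len(index_name) < len(prefix):
--         return None
--     for i in range(len(prefix)):
--         if index_name[i] != prefix[i]:
--             return None
--     if index_name == "paperpipe_default":
--         return ""
--     out = []
--     swapped = False
--     for i in range(len(prefix), len(index_name)):
--         c = index_name[i]
--         if c == "_" and not swapped:
--             out.append("/")
--             swapped = True
--         else:
--             out.append(c)
--     return "".join(out)
-- ===== Notes on version B (the rewrite author's own statement) =====
-- stated objective: alternative
-- what changed: Replaced A's string-method pipeline (startswith, slice, provider-table scan, replace) with a single character-level pass: the prefix is verified position by position and the suffix is emitted one character at a time with a boolean flag that turns only the first underscore into a slash; the provider table disappears because every match returned exactly the fallback value.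
import Mathlib
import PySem

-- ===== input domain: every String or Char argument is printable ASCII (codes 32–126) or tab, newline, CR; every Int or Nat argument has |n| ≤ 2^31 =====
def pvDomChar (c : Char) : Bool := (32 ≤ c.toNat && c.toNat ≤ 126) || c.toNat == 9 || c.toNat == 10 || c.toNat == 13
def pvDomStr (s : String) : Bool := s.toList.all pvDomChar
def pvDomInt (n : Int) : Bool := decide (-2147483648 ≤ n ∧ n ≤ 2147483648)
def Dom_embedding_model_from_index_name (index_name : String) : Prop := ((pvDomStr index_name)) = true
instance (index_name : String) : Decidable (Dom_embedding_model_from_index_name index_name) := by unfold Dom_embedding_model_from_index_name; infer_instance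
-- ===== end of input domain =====

-- B replaces A's string-method pipeline (startswith/slice/provider scan/replace) by one
-- character-level pass with a boolean first-underscore flag; objective: alternative (same result, no table).

-- ===== PORT A =====
-- exact port of s.replace("_", "/", 1): replace only the FIRST underscore (a count argument
-- PySem.Chars.replace does not take; exact since old/new are single characters)
def pvReplaceFirstU : List Char → List Char
  | [] => []
  | c :: rest => if c = '_' then '/' :: rest else c :: pvReplaceFirstU rest

-- A's `for provider in known_providers` loop
def pvLoopA (suffix : List Char) : List String → Option String
  | [] => none
  | p :: rest =>
      let safe := PySem.Chars.replace p.toList ['/'] ['_']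
      if PySem.Chars.startswith suffix safe then some (String.ofList (pvReplaceFirstU suffix))
      else pvLoopA suffix rest

def embedding_model_from_index_name (index_name : String) : Option String :=
  if !(PySem.Str.startswith index_name "paperpipe_") then none
  else
    let suffix := PySem.List.slice index_name.toList (some (10 : Int)) none
    if suffix = "default".toList then some ""
    else
      match pvLoopA suffix ["openai/", "voyage/", "ollama/", "openrouter/", "anthropic/",
                            "google/", "gemini/", "cohere/", "huggingface/"] with
      | some r => some r
      | none =>
          if PySem.Chars.isIn ['_'] suffix then some (String.ofList (pvReplaceFirstU suffix))
          else some (String.ofList suffix)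

-- ===== PORT B =====
-- Source B's index loop `for i in range(len(prefix)): if index_name[i] != prefix[i]: return None`,
-- transcribed as simultaneous recursion over the prefix and the name's characters
def pvPrefixOk : List Char → List Char → Bool
  | [], _ => true
  | _ :: _, [] => false
  | p :: ps, c :: cs => if c ≠ p then false else pvPrefixOk ps cs

-- Source B's emitting loop with its boolean first-underscore flag (out.append per character)
def pvEmit : List Char → Bool → List Char
  | [], _ => []
  | c :: rest, swapped =>
      if c = '_' && !swapped then '/' :: pvEmit rest true
      else c :: pvEmit rest swapped

def embedding_model_from_index_name_alt (index_name : String) : Option String :=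
  let cs := index_name.toList
  if cs.length < 10 then none
  else if !pvPrefixOk "paperpipe_".toList cs then none
  else if cs = "paperpipe_default".toList then some ""
  else some (String.ofList (pvEmit (cs.drop 10) false))

-- ===== PRECONDITION & SPEC =====
def Spec_embedding_model_from_index_name (index_name : String) (out : Option String) : Prop := out = embedding_model_from_index_name_alt index_name
instance (index_name : String) (out : Option String) : Decidable (Spec_embedding_model_from_index_name index_name out) := by unfold Spec_embedding_model_from_index_name; infer_instance

-- ===== CLAIM (what is proved, stated in full; the proofs are below) =====
def Claim_equal_embedding_model_from_index_name : Prop := ∀ (index_name : String), Dom_embedding_model_from_index_name index_name → Spec_embedding_model_from_index_name index_name (embedding_model_from_index_name index_name)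

-- ===== LEMMAS AND PROOFS =====

-- B's position-by-position check decides exactly list-prefix
theorem pvPrefixOk_iff (p cs : List Char) : pvPrefixOk p cs = true ↔ p <+: cs := by
  induction p generalizing cs with
  | nil => simp [pvPrefixOk]
  | cons a ps ih =>
      cases cs with
      | nil => simp [pvPrefixOk]
      | cons c cs' =>
          by_cases h : c = a
          · subst h; simp [pvPrefixOk, ih, List.cons_prefix_cons]
          · simp only [pvPrefixOk, if_pos (by exact h), Bool.false_eq_true, false_iff,
              List.cons_prefix_cons, not_and]
            exact fun hh => absurd hh.symm h

-- a matched prefix pins down the first p.length characters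
theorem eq_append_drop_of_prefix {p cs : List Char} (h : p <+: cs) :
    cs = p ++ cs.drop p.length := by
  obtain ⟨t, rfl⟩ := h
  simp

-- A's provider loop either falls through or returns exactly replace-first
theorem pvLoopA_cases (suffix : List Char) (ps : List String) :
    pvLoopA suffix ps = none ∨ pvLoopA suffix ps = some (String.ofList (pvReplaceFirstU suffix)) := by
  induction ps with
  | nil => exact Or.inl rfl
  | cons p rest ih =>
      simp only [pvLoopA]
      split
      · exact Or.inr rfl
      · exact ih

-- replace("_", "/", 1) is the identity on a string without underscores
theorem pvReplaceFirstU_of_not_mem (s : List Char) (h : '_' ∉ s) : pvReplaceFirstU s = s := by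
  induction s with
  | nil => rfl
  | cons c rest ih =>
      simp only [List.mem_cons, not_or] at h
      simp only [pvReplaceFirstU, if_neg (fun hc : c = '_' => h.1 hc.symm), ih h.2]

theorem not_mem_of_isIn_false (s : List Char) (h : PySem.Chars.isIn ['_'] s = false) : '_' ∉ s := by
  intro hm
  obtain ⟨l₁, l₂, rfl⟩ := List.append_of_mem hm
  have : PySem.Chars.isIn ['_'] (l₁ ++ '_' :: l₂) = true :=
    (PySem.Chars.isIn_iff_infix _ _).mpr ⟨l₁, l₂, by simp⟩
  simp [this] at h

-- with the flag already set, B's loop copies the rest unchanged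
theorem pvEmit_true (s : List Char) : pvEmit s true = s := by
  induction s with
  | nil => rfl
  | cons c rest ih => simp [pvEmit, ih]

-- B's flagged pass computes exactly replace-first
theorem pvEmit_false_eq (s : List Char) : pvEmit s false = pvReplaceFirstU s := by
  induction s with
  | nil => rfl
  | cons c rest ih =>
      by_cases h : c = '_'
      · subst h; simp [pvEmit, pvReplaceFirstU, pvEmit_true]
      · simp [pvEmit, pvReplaceFirstU, h, ih]

-- once past the prefix/default checks, A's remaining branches all produce replace-first
theorem pvTailA_eq (suffix : List Char) :
    (match pvLoopA suffix ["openai/", "voyage/", "ollama/", "openrouter/", "anthropic/",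
        "google/", "gemini/", "cohere/", "huggingface/"] with
      | some r => some r
      | none =>
          if PySem.Chars.isIn ['_'] suffix then some (String.ofList (pvReplaceFirstU suffix))
          else some (String.ofList suffix)) = some (String.ofList (pvReplaceFirstU suffix)) := by
  rcases pvLoopA_cases suffix ["openai/", "voyage/", "ollama/", "openrouter/", "anthropic/",
      "google/", "gemini/", "cohere/", "huggingface/"] with h | h <;> rw [h]
  cases hin : PySem.Chars.isIn ['_'] suffix with
  | true => simp
  | false =>
      simp only [Bool.false_eq_true, if_false]
      rw [pvReplaceFirstU_of_not_mem suffix (not_mem_of_isIn_false suffix hin)]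

-- ===== VERDICT (by name: the statement is the Claim_ definition above) =====
theorem embedding_model_from_index_name_spec : Claim_equal_embedding_model_from_index_name := by
  intro s _
  unfold Spec_embedding_model_from_index_name
  unfold embedding_model_from_index_name embedding_model_from_index_name_alt
  dsimp only
  by_cases hp : PySem.Str.startswith s "paperpipe_" = true
  · -- prefix matches
    have hpre : "paperpipe_".toList <+: s.toList := by
      rw [PySem.Str.startswith_eq] at hp
      exact (PySem.Chars.startswith_iff _ _).mp hp
    have hok : pvPrefixOk "paperpipe_".toList s.toList = true := (pvPrefixOk_iff _ _).mpr hpre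
    have hlen : ¬ s.toList.length < 10 := by
      have h10 := hpre.length_le
      have he : ("paperpipe_".toList).length = 10 := rfl
      omega
    have hdrop : PySem.List.slice s.toList (some (10 : Int)) none = s.toList.drop 10 := by
      simp [pysem]
    have hsplit : s.toList = "paperpipe_".toList ++ s.toList.drop 10 :=
      eq_append_drop_of_prefix hpre
    simp only [hp, Bool.not_true, Bool.false_eq_true, if_false, hok, hdrop, if_neg hlen]
    by_cases hd : s.toList.drop 10 = "default".toList
    · have hwhole : s.toList = "paperpipe_default".toList := by
        rw [hsplit, hd]; rfl
      rw [if_pos hd, if_pos hwhole]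
    · have hne : ¬ s.toList = "paperpipe_default".toList := by
        intro h
        apply hd
        have : s.toList.drop 10 = ("paperpipe_default".toList).drop 10 := by rw [h]
        simpa using this
      rw [if_neg hd, if_neg hne, pvEmit_false_eq]
      exact pvTailA_eq _
  · -- prefix does not match: B's two guards reject too
    have hnot : ¬ "paperpipe_".toList <+: s.toList := by
      intro h
      apply hp
      rw [PySem.Str.startswith_eq]
      exact (PySem.Chars.startswith_iff _ _).mpr h
    simp only [Bool.not_eq_true] at hp
    simp only [hp, Bool.not_false, if_true]
    by_cases hl : s.toList.length < 10
    · rw [if_pos hl]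
    · have hff : pvPrefixOk "paperpipe_".toList s.toList = false := by
        cases hh : pvPrefixOk "paperpipe_".toList s.toList with
        | false => rfl
        | true => exact absurd ((pvPrefixOk_iff _ _).mp hh) hnot
      rw [if_neg hl, if_pos (show (!pvPrefixOk "paperpipe_".toList s.toList) = true by
        rw [hff]; rfl)]
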